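-- pv_equiv track=rewrite | github.com/JOQUINYD/Asignacion_Fechas_AC | Asignacion_1a.py | calendario_del_mes
-- ===== SOURCE A (Python) =====
-- def calendario_del_mes(stWeekDay, month, leapYear):
--     monthCalendar = [[-1, -1, -1, -1, -1, -1, -1].copy(),
--                      [-1, -1, -1, -1, -1, -1, -1].copy(),
--                      [-1, -1, -1, -1, -1, -1, -1].copy(),
--                      [-1, -1, -1, -1, -1, -1, -1].copy(),
--                      [-1, -1, -1, -1, -1, -1, -1].copy(),
--                      [-1, -1, -1, -1, -1, -1, -1].copy()].copy()
--     if not leapYear: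
--         monthDays = [31, 28, 31, 30, 31, 30, 31, 31, 30, 31, 30, 31]
--     else:
--         monthDays = [31, 29, 31, 30, 31, 30, 31, 31, 30, 31, 30, 31]
--
--     currentWeek = 0
--     for day in range(1,monthDays[month]+1):
--         monthCalendar[currentWeek][stWeekDay] = day
--         stWeekDay = dia_semana_siguiente(stWeekDay)
--         if stWeekDay == 0:
--             currentWeek += 1
--
--     return (monthCalendar, stWeekDay)
--
-- def dia_semana_siguiente(weekDay):
--     if weekDay + 1 == 7:
--         return 0
--     return weekDay + 1
-- ===== SOURCE B (Python) =====
-- def calendario_del_mes(stWeekDay, month, leapYear):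
--     monthDays = [31, 29 if leapYear else 28, 31, 30, 31, 30, 31, 31, 30, 31, 30, 31]
--     days = monthDays[month]
--     start = stWeekDay % 7
--     cal = [[w * 7 + c - start + 1 if 0 <= w * 7 + c - start < days else -1
--             for c in range(7)] for w in range(6)]
--     return (cal, (start + days) % 7)
-- ===== Notes on version B (the rewrite author's own statement) =====
-- stated objective: simpler
-- what changed: B replaces A's mutating day loop with stateful weekday/week counters by a pure closed-form grid: each of the 42 cells is computed directly from its position (cell value = w*7+c-start+1 when in range, else -1), and the final weekday is (start+days)%7; the dia_semana_siguiente helper disappears.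
import Mathlib
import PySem

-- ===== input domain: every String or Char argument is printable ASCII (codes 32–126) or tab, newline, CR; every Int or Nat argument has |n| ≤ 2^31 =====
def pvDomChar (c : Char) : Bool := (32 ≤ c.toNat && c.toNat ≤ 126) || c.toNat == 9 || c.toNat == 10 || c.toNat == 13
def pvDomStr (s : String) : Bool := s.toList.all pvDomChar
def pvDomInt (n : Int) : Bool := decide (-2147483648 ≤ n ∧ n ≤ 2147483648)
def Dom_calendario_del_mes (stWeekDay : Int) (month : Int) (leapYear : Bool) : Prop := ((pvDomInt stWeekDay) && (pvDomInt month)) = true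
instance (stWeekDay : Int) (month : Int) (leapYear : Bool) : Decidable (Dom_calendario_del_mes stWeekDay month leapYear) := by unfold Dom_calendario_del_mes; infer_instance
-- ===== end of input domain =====

-- B computes each of the 42 grid cells by a closed formula from its (row, column) position
-- instead of A's mutating day loop with weekday/week counters (objective: simpler).

-- ===== PORT A =====
def dia_semana_siguiente (weekDay : Int) : Int :=
  if weekDay + 1 == 7 then 0 else weekDay + 1

def calendario_del_mes (stWeekDay : Int) (month : Int) (leapYear : Bool) : List (List Int) × Int :=
  let monthCalendar : List (List Int) :=
    [[-1, -1, -1, -1, -1, -1, -1], [-1, -1, -1, -1, -1, -1, -1],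
     [-1, -1, -1, -1, -1, -1, -1], [-1, -1, -1, -1, -1, -1, -1],
     [-1, -1, -1, -1, -1, -1, -1], [-1, -1, -1, -1, -1, -1, -1]]
  let monthDays : List Int :=
    if !leapYear then [31, 28, 31, 30, 31, 30, 31, 31, 30, 31, 30, 31]
    else [31, 29, 31, 30, 31, 30, 31, 31, 30, 31, 30, 31]
  -- monthDays[month]: pyGet? is exact; .getD 0 is only reached where Python raises (outside Pre_)
  let n : Int := (PySem.List.pyGet? monthDays month).getD 0
  let res := (PySem.List.pyRange 1 (n + 1) 1).foldl
    (fun (s : List (List Int) × Int × Int) day =>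
      let cal := s.1
      let st := s.2.1
      let week := s.2.2
      -- monthCalendar[currentWeek][stWeekDay] = day: pySetD/pyGet? are exact in range (guaranteed by Pre_)
      let cal' := PySem.List.pySetD cal week
        (PySem.List.pySetD ((PySem.List.pyGet? cal week).getD []) st day)
      let st' := dia_semana_siguiente st
      let week' := if st' == 0 then week + 1 else week
      (cal', st', week'))
    (monthCalendar, stWeekDay, 0)
  (res.1, res.2.1)

-- ===== PORT B =====
def calendario_del_mes_alt (stWeekDay : Int) (month : Int) (leapYear : Bool) : List (List Int) × Int :=
  let monthDays : List Int :=
    [31, if leapYear then 29 else 28, 31, 30, 31, 30, 31, 31, 30, 31, 30, 31]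
  let days : Int := (PySem.List.pyGet? monthDays month).getD 0
  let start : Int := PySem.Int.mod stWeekDay 7
  let cal : List (List Int) :=
    (PySem.List.pyRange 0 6 1).map (fun w =>
      (PySem.List.pyRange 0 7 1).map (fun c =>
        if 0 ≤ w * 7 + c - start ∧ w * 7 + c - start < days
        then w * 7 + c - start + 1 else -1))
  (cal, PySem.Int.mod (start + days) 7)

-- ===== PRECONDITION & SPEC =====
-- Pre_ excludes exactly the inputs on which A raises IndexError: stWeekDay outside [-7,6]
-- (the cell assignment indexes out of range) or month outside [-12,11] (monthDays lookup).
def Pre_calendario_del_mes (stWeekDay : Int) (month : Int) (leapYear : Bool) : Prop :=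
  -7 ≤ stWeekDay ∧ stWeekDay < 7 ∧ -12 ≤ month ∧ month < 12
instance (stWeekDay : Int) (month : Int) (leapYear : Bool) : Decidable (Pre_calendario_del_mes stWeekDay month leapYear) := by unfold Pre_calendario_del_mes; infer_instance
def pvWitness_calendario_del_mes : Int × Int × Bool := (3, 1, true)


def Spec_calendario_del_mes (stWeekDay : Int) (month : Int) (leapYear : Bool) (out : List (List Int) × Int) : Prop := out = calendario_del_mes_alt stWeekDay month leapYear
instance (stWeekDay : Int) (month : Int) (leapYear : Bool) (out : List (List Int) × Int) : Decidable (Spec_calendario_del_mes stWeekDay month leapYear out) := by unfold Spec_calendario_del_mes; infer_instance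

-- ===== CLAIM (what is proved, stated in full; the proofs are below) =====
def Claim_equal_calendario_del_mes : Prop := ∀ (stWeekDay : Int) (month : Int) (leapYear : Bool), Dom_calendario_del_mes stWeekDay month leapYear → Pre_calendario_del_mes stWeekDay month leapYear → Spec_calendario_del_mes stWeekDay month leapYear (calendario_del_mes stWeekDay month leapYear)

-- ===== LEMMAS AND PROOFS =====

-- ===== VERDICT (by name: the statement is the Claim_ definition above) =====
set_option maxHeartbeats 4000000 in
set_option maxRecDepth 10000 in
theorem calendario_del_mes_spec : Claim_equal_calendario_del_mes := by
  intro stWeekDay month leapYear _ hpre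
  obtain ⟨h1, h2, h3, h4⟩ := hpre
  unfold Spec_calendario_del_mes
  interval_cases stWeekDay <;> interval_cases month <;> cases leapYear <;> decide
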